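-- pv_equiv track=rewrite | github.com/Chris-P-15B/Voice-Automation | dialplan_analyser.py | parse_regex
-- ===== SOURCE A (Python) =====
-- import itertools, csv, sys, json
--
-- def parse_regex(pattern, range_start, range_end):
--     """Parse CUCM regex pattern and return list of the digit strings the regex matches within the
--      number range specified"""
--     is_slice = False
--     is_range = False
--     is_negate = False
--     num_digits = 0
--     digits = []
--     numbers_in_use = []
--
--     # Parse regex and store digits in jagged list
--     for column in range(16):
--         digits.append([])
--     for char in pattern:
--         if char == '[':
--             is_slice = True
--         elif char == '^' and is_slice == True:
--             is_negate = True
--         elif char == ']':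
--             is_slice = False
--             if is_negate == True:
--                 negate_slice = []
--                 for range_char in ['0', '1', '2', '3', '4', '5', '6', '7', '8', '9']:
--                     if range_char not in digits[num_digits]:
--                         negate_slice.append(range_char)
--                 digits[num_digits] = negate_slice[:]
--                 is_negate = False
--             num_digits += 1
--         elif char in ['0', '1', '2', '3', '4', '5', '6', '7', '8', '9']:
--             if is_range == False:
--                 digits[num_digits].append(char)
--                 if is_slice == False:
--                     num_digits += 1
--             else:
--                 for range_char in range(int(digits[num_digits][-1]) + 1, int(char) + 1):
--                     digits[num_digits].append(str(range_char))
--                 is_range = False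
--         elif char == '-' and is_slice == True:
--             is_range = True
--         elif char == 'X':
--             digits[num_digits] = ['0', '1', '2', '3', '4', '5', '6', '7', '8', '9']
--             num_digits += 1
--         elif char == '*' or char == '#':
--             # Strings containing * or # can't be parsed as an integer so return empty list as also
--             # not a valid PSTN number
--             return []
--
--     # Strip empty lists
--     digits2 = [x for x in digits if x != []]
--
--     # Use itertools.product() to convert jagged list of digits to list of permutation strings
--     #  >= range_start & <= range_end
--     for list in itertools.product(*digits2):
--         char_string = ''
--         for char in list:
--             char_string += str(char)
--         if char_string:
--             number = int(char_string)
--             if number >= range_start and number <= range_end: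
--                 numbers_in_use.append(char_string)
--
--     return numbers_in_use
-- ===== SOURCE B (Python) =====
-- def parse_regex(pattern, range_start, range_end):
--     """Parse CUCM regex pattern and return list of the digit strings the regex matches within the
--     number range specified.  Single-pass parser into a dynamic list of digit groups, then a
--     recursive prefix enumeration instead of materialising the itertools product."""
--     groups = []          # completed digit positions
--     cur = []             # digits collected for the currently open position
--     in_class = False
--     negate = False
--     pending_range = False
--
--     for ch in pattern:
--         if ch == '*' or ch == '#':
--             # not a parseable PSTN number
--             return []
--         if ch == '[':
--             in_class = True
--         elif ch == '^' and in_class: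
--             negate = True
--         elif ch == ']':
--             in_class = False
--             if negate:
--                 cur = [d for d in '0123456789' if d not in cur]
--                 negate = False
--             groups.append(cur)
--             cur = []
--         elif ch == '-' and in_class:
--             pending_range = True
--         elif ch == 'X':
--             groups.append(list('0123456789'))
--             cur = []
--         elif '0' <= ch <= '9':
--             if pending_range:
--                 cur.extend(str(d) for d in range(int(cur[-1]) + 1, int(ch) + 1))
--                 pending_range = False
--             elif in_class:
--                 cur.append(ch)
--             else:
--                 groups.append([ch])
--     if cur:
--         groups.append(cur)
--     groups = [g for g in groups if g]
--
--     out = []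
--
--     def dfs(i, s):
--         if i == len(groups):
--             if s and range_start <= int(s) <= range_end:
--                 out.append(s)
--             return
--         for d in groups[i]:
--             dfs(i + 1, s + d)
--
--     dfs(0, '')
--     return out
-- ===== Notes on version B (the rewrite author's own statement) =====
-- stated objective: alternative
-- what changed: B replaces A's fixed 16-slot jagged-array state machine and materialised itertools.product pass (join + int + range filter over every tuple) by a single-pass parser into a dynamic list of digit groups followed by a recursive prefix enumeration that shares prefixes and emits matching strings directly.
import Mathlib
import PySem

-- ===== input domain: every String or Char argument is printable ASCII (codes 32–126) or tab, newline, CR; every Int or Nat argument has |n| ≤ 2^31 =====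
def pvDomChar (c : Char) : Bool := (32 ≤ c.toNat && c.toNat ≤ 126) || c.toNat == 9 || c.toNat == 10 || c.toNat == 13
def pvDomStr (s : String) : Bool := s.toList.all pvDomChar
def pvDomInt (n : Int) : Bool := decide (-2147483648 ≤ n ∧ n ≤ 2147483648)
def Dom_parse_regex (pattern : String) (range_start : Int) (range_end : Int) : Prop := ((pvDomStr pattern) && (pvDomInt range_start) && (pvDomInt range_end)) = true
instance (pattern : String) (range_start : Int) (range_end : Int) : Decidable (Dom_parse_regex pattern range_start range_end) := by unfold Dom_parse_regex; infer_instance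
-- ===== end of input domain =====

-- B replaces A's fixed 16-slot array state machine + materialised itertools.product by a dynamic
-- group list and a recursive prefix enumeration sharing prefixes (objective: alternative algorithm;
-- a timing run measured a constant-factor speedup).
-- Python's single-character digit strings are ported as Char (exact: every stored string is one digit).

-- ===== PORT A =====

-- the literal list ['0','1',…,'9'] A uses
def pvDigitChars : List Char := ['0', '1', '2', '3', '4', '5', '6', '7', '8', '9']

-- str(k) for 0 ≤ k ≤ 9 (the only values A feeds it: range bounds lie in 1..10)
def pvDigitOf (k : Int) : Char := Char.ofNat (48 + k.toNat)

structure PAState where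
  slice : Bool
  rng   : Bool
  neg   : Bool
  n     : Nat
  digs  : List (List Char)
  bail  : Bool
deriving Repr, DecidableEq

-- one iteration of A's `for char in pattern` loop (early `return []` modelled by the bail flag)
def pvStepA (st : PAState) (c : Char) : PAState :=
  if st.bail then st
  else if c = '[' then { st with slice := true }
  else if c = '^' ∧ st.slice = true then { st with neg := true }
  else if c = ']' then
    let digs' :=
      if st.neg then
        st.digs.set st.n
          (pvDigitChars.foldl (fun acc d => if d ∈ st.digs.getD st.n [] then acc else acc ++ [d]) [])
      else st.digs
    { st with slice := false, neg := false, n := st.n + 1, digs := digs' }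
  else if c ∈ pvDigitChars then
    if st.rng = false then
      let digs' := st.digs.modify st.n (fun cur => cur ++ [c])
      if st.slice = false then { st with digs := digs', n := st.n + 1 }
      else { st with digs := digs' }
    else
      let lastc := (st.digs.getD st.n []).getLast?.getD '0'
      let a := (PySem.Int.ofChars? [lastc]).getD 0 + 1
      let b := (PySem.Int.ofChars? [c]).getD 0 + 1
      { st with
        digs := st.digs.modify st.n
          (fun cur => (PySem.List.pyRange a b 1).foldl (fun l k => l ++ [pvDigitOf k]) cur),
        rng := false }
  else if c = '-' ∧ st.slice = true then { st with rng := true }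
  else if c = 'X' then { st with digs := st.digs.set st.n pvDigitChars, n := st.n + 1 }
  else if c = '*' ∨ c = '#' then { st with bail := true }
  else st

-- itertools.product(*lists) in itertools' order (leftmost position varies slowest)
def pvProduct {α : Type} : List (List α) → List (List α)
  | [] => [[]]
  | l :: ls => l.flatMap (fun x => (pvProduct ls).map (x :: ·))

def parse_regex (pattern : String) (range_start : Int) (range_end : Int) : List String :=
  -- for column in range(16): digits.append([])
  let init : PAState :=
    { slice := false, rng := false, neg := false, n := 0,
      digs := (List.range 16).foldl (fun l _ => l ++ [([] : List Char)]) [], bail := false }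
  let st := pattern.toList.foldl pvStepA init
  if st.bail then []
  else
    let digits2 := st.digs.filter (fun x => x ≠ [])
    (pvProduct digits2).foldl
      (fun acc t =>
        let s := t.foldl (fun a c => a ++ [c]) []
        if s ≠ [] then
          let number := (PySem.Int.ofChars? s).getD 0
          if range_start ≤ number ∧ number ≤ range_end then acc ++ [String.ofList s] else acc
        else acc) []

-- ===== PORT B =====

structure PBState where
  slice  : Bool
  rng    : Bool
  neg    : Bool
  groups : List (List Char)
  cur    : List Char
  bail   : Bool
deriving Repr, DecidableEq

-- one iteration of B's parsing loop
def pvStepB (st : PBState) (c : Char) : PBState :=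
  if st.bail then st
  else if c = '*' ∨ c = '#' then { st with bail := true }
  else if c = '[' then { st with slice := true }
  else if c = '^' ∧ st.slice = true then { st with neg := true }
  else if c = ']' then
    let g := if st.neg then pvDigitChars.filter (fun d => d ∉ st.cur) else st.cur
    { st with slice := false, neg := false, groups := st.groups ++ [g], cur := [] }
  else if c = '-' ∧ st.slice = true then { st with rng := true }
  else if c = 'X' then { st with groups := st.groups ++ [pvDigitChars], cur := [] }
  else if c ∈ pvDigitChars then
    if st.rng then
      let lastc := st.cur.getLast?.getD '0'
      { st with
        cur := st.cur ++
          ((PySem.List.pyRange ((PySem.Int.ofChars? [lastc]).getD 0 + 1)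
              ((PySem.Int.ofChars? [c]).getD 0 + 1) 1).map pvDigitOf),
        rng := false }
    else if st.slice then { st with cur := st.cur ++ [c] }
    else { st with groups := st.groups ++ [[c]] }
  else st

-- B's recursive prefix enumeration (dfs)
def pvDfs (range_start range_end : Int) : List (List Char) → List Char → List String
  | [], s =>
      if s ≠ [] ∧ range_start ≤ (PySem.Int.ofChars? s).getD 0 ∧ (PySem.Int.ofChars? s).getD 0 ≤ range_end
      then [String.ofList s] else []
  | g :: rest, s => g.flatMap (fun d => pvDfs range_start range_end rest (s ++ [d]))

def parse_regex_alt (pattern : String) (range_start : Int) (range_end : Int) : List String :=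
  let st := pattern.toList.foldl pvStepB
    { slice := false, rng := false, neg := false, groups := [], cur := [], bail := false }
  if st.bail then []
  else
    let gs := (st.groups ++ (if st.cur ≠ [] then [st.cur] else [])).filter (fun g => g ≠ [])
    pvDfs range_start range_end gs []

-- ===== PRECONDITION & SPEC =====

-- Safety scanner: tracks only the class/range/negate flags, the position count and whether the
-- open position is nonempty, and reports whether A's parse ever indexes digits[16] or takes
-- digits[n][-1] of an empty list (the exact IndexError set of A).
def pvPreScan : List Char → Bool → Bool → Bool → Nat → Bool → Bool
  | [], _, _, _, _, _ => true
  | c :: cs, slice, rng, neg, n, curNE =>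
    if c = '*' ∨ c = '#' then true
    else if c = '[' then pvPreScan cs true rng neg n curNE
    else if c = '^' ∧ slice = true then pvPreScan cs slice rng true n curNE
    else if c = ']' then (!neg || decide (n ≤ 15)) && pvPreScan cs false rng false (n + 1) false
    else if c ∈ pvDigitChars then
      if rng then curNE && decide (n ≤ 15) && pvPreScan cs slice false neg n curNE
      else decide (n ≤ 15) &&
        (if slice then pvPreScan cs slice rng neg n true else pvPreScan cs slice rng neg (n + 1) false)
    else if c = '-' ∧ slice = true then pvPreScan cs slice true neg n curNE
    else if c = 'X' then decide (n ≤ 15) && pvPreScan cs slice rng neg (n + 1) false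
    else pvPreScan cs slice rng neg n curNE

-- Pre_ excludes exactly the patterns on which A raises IndexError (more than 16 digit positions,
-- or a '-' range whose left side is an empty position).
def Pre_parse_regex (pattern : String) (range_start : Int) (range_end : Int) : Prop :=
  pvPreScan pattern.toList false false false 0 false = true

instance (pattern : String) (range_start : Int) (range_end : Int) :
    Decidable (Pre_parse_regex pattern range_start range_end) := by
  unfold Pre_parse_regex; infer_instance

def pvWitness_parse_regex : String × Int × Int := ("2[1-3]X", 0, 3000)


def Spec_parse_regex (pattern : String) (range_start : Int) (range_end : Int) (out : List String) : Prop := out = parse_regex_alt pattern range_start range_end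
instance (pattern : String) (range_start : Int) (range_end : Int) (out : List String) : Decidable (Spec_parse_regex pattern range_start range_end out) := by unfold Spec_parse_regex; infer_instance

-- ===== CLAIM (what is proved, stated in full; the proofs are below) =====
def Claim_equal_parse_regex : Prop := ∀ (pattern : String) (range_start : Int) (range_end : Int), Dom_parse_regex pattern range_start range_end → Pre_parse_regex pattern range_start range_end → Spec_parse_regex pattern range_start range_end (parse_regex pattern range_start range_end)

-- ===== LEMMAS AND PROOFS =====

-- the jagged-array / dynamic-groups correspondence
def pvInvBranch (n : Nat) (digs groups : List (List Char)) (cur : List Char) : Prop :=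
  (n ≤ 15 ∧ digs = groups ++ [cur] ++ List.replicate (15 - n) []) ∨
  (16 ≤ n ∧ digs = groups.take 16 ∧ cur = [] ∧ ∀ g ∈ groups.drop 16, g = [])

-- state correspondence maintained along the parse
def pvInv (sa : PAState) (sb : PBState) : Prop :=
  sb.bail = sa.bail ∧ sb.slice = sa.slice ∧ sb.rng = sa.rng ∧ sb.neg = sa.neg ∧
  sb.groups.length = sa.n ∧ (sa.slice = false → sb.cur = []) ∧
  pvInvBranch sa.n sa.digs sb.groups sb.cur

-- what survives to the enumeration phase
def pvRel (sa : PAState) (sb : PBState) : Prop :=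
  sb.bail = sa.bail ∧
  sa.digs.filter (fun x => x ≠ []) = (sb.groups ++ [sb.cur]).filter (fun g => g ≠ [])

lemma pv_modify_at (g r : List (List Char)) (x : List Char) (f : List Char → List Char) :
    (g ++ x :: r).modify g.length f = g ++ f x :: r := by
  rw [List.modify_eq_set_getElem?]
  simp [List.set_append_right]

lemma pv_set_at (g r : List (List Char)) (x v : List Char) :
    (g ++ x :: r).set g.length v = g ++ v :: r := by
  rw [List.set_append_right] <;> simp

-- A's negation loop is a filter (shape specific to A's `for range_char …: if not in: append`)
lemma pv_negfold (l cur acc : List Char) :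
    l.foldl (fun acc d => if d ∈ cur then acc else acc ++ [d]) acc
      = acc ++ l.filter (fun d => d ∉ cur) := by
  induction l generalizing acc with
  | nil => simp
  | cons a l ih => by_cases h : a ∈ cur <;> simp [h, ih]

lemma pv_digit_ne (c : Char) (h : c ∈ pvDigitChars) :
    c ≠ '[' ∧ c ≠ '^' ∧ c ≠ ']' ∧ c ≠ '-' ∧ c ≠ 'X' ∧ ¬(c = '*' ∨ c = '#') := by
  fin_cases h <;> decide

lemma pvBailA (cs : List Char) (sa : PAState) (h : sa.bail = true) :
    cs.foldl pvStepA sa = sa := by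
  induction cs with
  | nil => rfl
  | cons c cs ih => simpa [pvStepA, h] using ih

lemma pvBailB (cs : List Char) (sb : PBState) (h : sb.bail = true) :
    cs.foldl pvStepB sb = sb := by
  induction cs with
  | nil => rfl
  | cons c cs ih => simpa [pvStepB, h] using ih

lemma pvInvRel (sa : PAState) (sb : PBState) (h : pvInv sa sb) : pvRel sa sb := by
  obtain ⟨h1, _, _, _, _, _, hbr⟩ := h
  refine ⟨h1, ?_⟩
  rcases hbr with ⟨_, hd⟩ | ⟨_, hd, hc, hdrop⟩
  · rw [hd]
    simp [List.filter_append, List.filter_cons]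
  · have hrest : (List.drop 16 sb.groups).filter (fun x => x ≠ []) = [] :=
      List.filter_eq_nil_iff.mpr (by intro g hg; simp [hdrop g hg])
    rw [hd, hc]
    have h1 : (sb.groups ++ [([] : List Char)]).filter (fun g => g ≠ []) = sb.groups.filter (fun g => g ≠ []) := by
      rw [List.filter_append]; simp
    rw [h1]
    conv_rhs => rw [← List.take_append_drop 16 sb.groups]
    rw [List.filter_append, hrest, List.append_nil]

-- the pushed state after a completed position
lemma pvPush (n : Nat) (groups : List (List Char)) (g : List Char)
    (hle : n ≤ 15) (hlen : groups.length = n) :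
    pvInvBranch (n + 1) (groups ++ g :: List.replicate (15 - n) []) (groups ++ [g]) [] := by
  rcases Nat.lt_or_ge n 15 with h | h
  · left
    refine ⟨by omega, ?_⟩
    have : 15 - n = (15 - (n + 1)) + 1 := by omega
    rw [this, List.replicate_succ]
    simp
  · have hn : n = 15 := by omega
    right
    subst hn
    refine ⟨le_refl _, ?_, rfl, ?_⟩
    · rw [List.take_of_length_le (by simp [hlen])]
      simp
    · intro x hx
      rw [List.drop_eq_nil_of_le (by simp [hlen])] at hx
      simp at hx

-- `for k in range(..): cur.append(str(k))` flattens to a map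
lemma pv_flatten_singleton {α β : Type} (f : α → β) (l : List α) :
    (List.map (fun x => [f x]) l).flatten = l.map f := by
  rw [← List.flatMap_def]; exact List.map_eq_flatMap.symm

lemma pvLoop (cs : List Char) : ∀ (sa : PAState) (sb : PBState),
    sa.bail = false → pvInv sa sb →
    pvPreScan cs sa.slice sa.rng sa.neg sa.n (decide (sb.cur ≠ [])) = true →
    pvRel (cs.foldl pvStepA sa) (cs.foldl pvStepB sb) := by
  induction cs with
  | nil => intro sa sb _ hInv _; exact pvInvRel _ _ hInv
  | cons c cs ih =>
    rintro ⟨slA, rgA, ngA, an, adigs, blA⟩ ⟨aslice, arng, aneg, groups, cur, bbail⟩ hb hInv hscan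
    obtain ⟨h1, h2, h3, h4, hlen, hcur0, hbr⟩ := hInv
    dsimp only at h1 h2 h3 h4 hlen hcur0 hbr hb hscan ⊢
    subst h1 h2 h3 h4 hb
    by_cases hstar : c = '*' ∨ c = '#'
    · -- early return: both bail, states frozen
      have hA : pvStepA ⟨aslice, arng, aneg, an, adigs, false⟩ c
          = ⟨aslice, arng, aneg, an, adigs, true⟩ := by
        rcases hstar with rfl | rfl <;> simp [pvStepA, pvDigitChars]
      have hB : pvStepB ⟨aslice, arng, aneg, groups, cur, false⟩ c
          = ⟨aslice, arng, aneg, groups, cur, true⟩ := by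
        rcases hstar with rfl | rfl <;> simp [pvStepB]
      rw [List.foldl_cons, List.foldl_cons, hA, hB, pvBailA _ _ rfl, pvBailB _ _ rfl]
      exact pvInvRel _ _ ⟨rfl, rfl, rfl, rfl, hlen, hcur0, hbr⟩
    · by_cases hlb : c = '['
      · subst hlb
        rw [List.foldl_cons, List.foldl_cons,
          show pvStepA ⟨aslice, arng, aneg, an, adigs, false⟩ '['
              = ⟨true, arng, aneg, an, adigs, false⟩ from by simp [pvStepA],
          show pvStepB ⟨aslice, arng, aneg, groups, cur, false⟩ '['
              = ⟨true, arng, aneg, groups, cur, false⟩ from by simp [pvStepB]]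
        refine ih _ _ rfl ⟨rfl, rfl, rfl, rfl, hlen, by simp, hbr⟩ ?_
        simpa [pvPreScan] using hscan
      · by_cases hhat : c = '^'
        · subst hhat
          by_cases hs : aslice = true
          · subst hs
            rw [List.foldl_cons, List.foldl_cons,
              show pvStepA ⟨true, arng, aneg, an, adigs, false⟩ '^'
                  = ⟨true, arng, true, an, adigs, false⟩ from by simp [pvStepA],
              show pvStepB ⟨true, arng, aneg, groups, cur, false⟩ '^'
                  = ⟨true, arng, true, groups, cur, false⟩ from by simp [pvStepB]]
            refine ih _ _ rfl ⟨rfl, rfl, rfl, rfl, hlen, by simp, hbr⟩ ?_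
            simpa [pvPreScan] using hscan
          · have hs' : aslice = false := by simpa using hs
            subst hs'
            rw [List.foldl_cons, List.foldl_cons,
              show pvStepA ⟨false, arng, aneg, an, adigs, false⟩ '^'
                  = ⟨false, arng, aneg, an, adigs, false⟩ from by simp [pvStepA, pvDigitChars],
              show pvStepB ⟨false, arng, aneg, groups, cur, false⟩ '^'
                  = ⟨false, arng, aneg, groups, cur, false⟩ from by simp [pvStepB, pvDigitChars]]
            refine ih _ _ rfl ⟨rfl, rfl, rfl, rfl, hlen, hcur0, hbr⟩ ?_
            simpa [pvPreScan, pvDigitChars] using hscan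
        · by_cases hrb : c = ']'
          · subst hrb
            have hscan' : (!aneg || decide (an ≤ 15))
                && pvPreScan cs false arng false (an + 1) false = true := by
              simpa [pvPreScan] using hscan
            rw [Bool.and_eq_true] at hscan'
            obtain ⟨hguard, hrec⟩ := hscan'
            by_cases hn : aneg = true
            · subst hn
              have hle : an ≤ 15 := by simpa using hguard
              rcases hbr with ⟨_, hd⟩ | ⟨h16, _⟩
              swap
              · exfalso; omega
              subst hd
              have hgd : (groups ++ cur :: List.replicate (15 - an) [])[an]?.getD [] = cur := by
                rw [← hlen]
                simp
              have hset : ∀ v, (groups ++ cur :: List.replicate (15 - an) []).set an v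
                  = groups ++ v :: List.replicate (15 - an) [] := by
                intro v
                rw [← hlen]; exact pv_set_at groups _ cur v
              rw [List.foldl_cons, List.foldl_cons,
                show pvStepA ⟨aslice, arng, true, an, groups ++ [cur] ++ List.replicate (15 - an) [], false⟩ ']'
                    = ⟨false, arng, false, an + 1,
                        groups ++ (pvDigitChars.filter (fun d => d ∉ cur)) :: List.replicate (15 - an) [], false⟩ from by
                  simp [pvStepA, hgd, pv_negfold, hset],
                show pvStepB ⟨aslice, arng, true, groups, cur, false⟩ ']'
                    = ⟨false, arng, false, groups ++ [pvDigitChars.filter (fun d => d ∉ cur)], [], false⟩ from by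
                  simp [pvStepB]]
              refine ih _ _ rfl ⟨rfl, rfl, rfl, rfl, by simp [hlen], by simp, ?_⟩ (by simpa using hrec)
              simpa using pvPush an groups _ hle hlen
            · have hn' : aneg = false := by simpa using hn
              subst hn'
              rcases hbr with ⟨hle, hd⟩ | ⟨h16, hd, hc, hdrop⟩
              · subst hd
                rw [List.foldl_cons, List.foldl_cons,
                  show pvStepA ⟨aslice, arng, false, an, groups ++ [cur] ++ List.replicate (15 - an) [], false⟩ ']'
                      = ⟨false, arng, false, an + 1, groups ++ [cur] ++ List.replicate (15 - an) [], false⟩ from by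
                    simp [pvStepA],
                  show pvStepB ⟨aslice, arng, false, groups, cur, false⟩ ']'
                      = ⟨false, arng, false, groups ++ [cur], [], false⟩ from by simp [pvStepB]]
                refine ih _ _ rfl ⟨rfl, rfl, rfl, rfl, by simp [hlen], by simp, ?_⟩ (by simpa using hrec)
                have := pvPush an groups cur hle hlen
                simpa [List.append_assoc] using this
              · subst hd hc
                rw [List.foldl_cons, List.foldl_cons,
                  show pvStepA ⟨aslice, arng, false, an, groups.take 16, false⟩ ']'
                      = ⟨false, arng, false, an + 1, groups.take 16, false⟩ from by simp [pvStepA],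
                  show pvStepB ⟨aslice, arng, false, groups, [], false⟩ ']'
                      = ⟨false, arng, false, groups ++ [[]], [], false⟩ from by simp [pvStepB]]
                refine ih _ _ rfl ⟨rfl, rfl, rfl, rfl, by simp [hlen], by simp, ?_⟩ (by simpa using hrec)
                dsimp only
                right
                refine ⟨by omega, ?_, rfl, ?_⟩
                · rw [List.take_append_of_le_length (by omega)]
                · rw [List.drop_append_of_le_length (by omega)]
                  intro g hg
                  rcases List.mem_append.mp hg with h | h
                  · exact hdrop g h
                  · simpa using h
          · by_cases hmem : c ∈ pvDigitChars
            · obtain ⟨ne1, ne2, ne3, ne4, ne5, ne6⟩ := pv_digit_ne c hmem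
              by_cases hr : arng = true
              · subst hr
                have hscan' : (decide (cur ≠ []) && decide (an ≤ 15))
                    && pvPreScan cs aslice false aneg an (decide (cur ≠ [])) = true := by
                  simpa [pvPreScan, ne1, ne2, ne3, ne4, hmem, ne6] using hscan
                simp only [Bool.and_eq_true, decide_eq_true_eq] at hscan'
                obtain ⟨⟨hcne, hle⟩, hrec⟩ := hscan'
                rcases hbr with ⟨_, hd⟩ | ⟨h16, _⟩
                swap
                · exfalso; omega
                subst hd
                have hgd : (groups ++ cur :: List.replicate (15 - an) [])[an]?.getD [] = cur := by
                  rw [← hlen]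
                  simp
                have hmod : ∀ f, (groups ++ cur :: List.replicate (15 - an) []).modify an f
                    = groups ++ f cur :: List.replicate (15 - an) [] := by
                  intro f
                  rw [← hlen]; exact pv_modify_at groups _ cur f
                set rng := (PySem.List.pyRange
                    ((PySem.Int.ofChars? [cur.getLast?.getD '0']).getD 0 + 1)
                    ((PySem.Int.ofChars? [c]).getD 0 + 1) 1).map pvDigitOf with hrng
                rw [List.foldl_cons, List.foldl_cons,
                  show pvStepA ⟨aslice, true, aneg, an, groups ++ [cur] ++ List.replicate (15 - an) [], false⟩ c
                      = ⟨aslice, false, aneg, an, groups ++ (cur ++ rng) :: List.replicate (15 - an) [], false⟩ from by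
                    simp [pvStepA, ne1, ne2, ne3, ne4, ne5, ne6, hmem, hgd, hmod,
                      pv_flatten_singleton, hrng],
                  show pvStepB ⟨aslice, true, aneg, groups, cur, false⟩ c
                      = ⟨aslice, false, aneg, groups, cur ++ rng, false⟩ from by
                    simp [pvStepB, ne1, ne2, ne3, ne4, ne5, ne6, hmem, hrng]]
                refine ih _ _ rfl ⟨rfl, rfl, rfl, rfl, hlen,
                  fun h => absurd (hcur0 h) hcne, Or.inl ⟨hle, by simp⟩⟩ ?_
                have hne2 : decide ((cur ++ rng) ≠ []) = true := by
                  simp only [decide_eq_true_eq]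
                  intro h
                  exact hcne (List.append_eq_nil_iff.mp h).1
                rw [hne2]
                simpa [decide_eq_true hcne] using hrec
              · have hr' : arng = false := by simpa using hr
                subst hr'
                have hscan' : decide (an ≤ 15) && (if aslice then pvPreScan cs aslice false aneg an true
                    else pvPreScan cs aslice false aneg (an + 1) false) = true := by
                  simpa [pvPreScan, ne1, ne2, ne3, ne4, hmem, ne6] using hscan
                simp only [Bool.and_eq_true, decide_eq_true_eq] at hscan'
                obtain ⟨hle, hrec⟩ := hscan'
                rcases hbr with ⟨_, hd⟩ | ⟨h16, _⟩
                swap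
                · exfalso; omega
                subst hd
                have hmod : ∀ f, (groups ++ cur :: List.replicate (15 - an) []).modify an f
                    = groups ++ f cur :: List.replicate (15 - an) [] := by
                  intro f
                  rw [← hlen]; exact pv_modify_at groups _ cur f
                by_cases hs : aslice = true
                · subst hs
                  rw [List.foldl_cons, List.foldl_cons,
                    show pvStepA ⟨true, false, aneg, an, groups ++ [cur] ++ List.replicate (15 - an) [], false⟩ c
                        = ⟨true, false, aneg, an, groups ++ (cur ++ [c]) :: List.replicate (15 - an) [], false⟩ from by
                      simp [pvStepA, ne1, ne2, ne3, ne4, ne5, hmem, hmod],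
                    show pvStepB ⟨true, false, aneg, groups, cur, false⟩ c
                        = ⟨true, false, aneg, groups, cur ++ [c], false⟩ from by
                      simp [pvStepB, ne1, ne2, ne3, ne4, ne5, ne6, hmem]]
                  refine ih _ _ rfl ⟨rfl, rfl, rfl, rfl, hlen, by simp, Or.inl ⟨hle, by simp⟩⟩ ?_
                  simpa using hrec
                · have hs' : aslice = false := by simpa using hs
                  subst hs'
                  have hce : cur = [] := hcur0 rfl
                  subst hce
                  rw [List.foldl_cons, List.foldl_cons,
                    show pvStepA ⟨false, false, aneg, an, groups ++ [[]] ++ List.replicate (15 - an) [], false⟩ c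
                        = ⟨false, false, aneg, an + 1, groups ++ [c] :: List.replicate (15 - an) [], false⟩ from by
                      simp [pvStepA, ne1, ne2, ne3, ne4, ne5, hmem, hmod],
                    show pvStepB ⟨false, false, aneg, groups, [], false⟩ c
                        = ⟨false, false, aneg, groups ++ [[c]], [], false⟩ from by
                      simp [pvStepB, ne1, ne2, ne3, ne4, ne5, ne6, hmem]]
                  refine ih _ _ rfl ⟨rfl, rfl, rfl, rfl, by simp [hlen], by simp, ?_⟩ (by simpa using hrec)
                  simpa using pvPush an groups [c] hle hlen
            · by_cases hdash : c = '-'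
              · subst hdash
                by_cases hs : aslice = true
                · subst hs
                  rw [List.foldl_cons, List.foldl_cons,
                    show pvStepA ⟨true, arng, aneg, an, adigs, false⟩ '-'
                        = ⟨true, true, aneg, an, adigs, false⟩ from by simp [pvStepA, pvDigitChars],
                    show pvStepB ⟨true, arng, aneg, groups, cur, false⟩ '-'
                        = ⟨true, true, aneg, groups, cur, false⟩ from by simp [pvStepB, pvDigitChars]]
                  refine ih _ _ rfl ⟨rfl, rfl, rfl, rfl, hlen, by simp, hbr⟩ ?_
                  simpa [pvPreScan, pvDigitChars] using hscan
                · have hs' : aslice = false := by simpa using hs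
                  subst hs'
                  rw [List.foldl_cons, List.foldl_cons,
                    show pvStepA ⟨false, arng, aneg, an, adigs, false⟩ '-'
                        = ⟨false, arng, aneg, an, adigs, false⟩ from by simp [pvStepA, pvDigitChars],
                    show pvStepB ⟨false, arng, aneg, groups, cur, false⟩ '-'
                        = ⟨false, arng, aneg, groups, cur, false⟩ from by simp [pvStepB, pvDigitChars]]
                  refine ih _ _ rfl ⟨rfl, rfl, rfl, rfl, hlen, hcur0, hbr⟩ ?_
                  simpa [pvPreScan, pvDigitChars] using hscan
              · by_cases hX : c = 'X'
                · subst hX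
                  have hscan' : decide (an ≤ 15)
                      && pvPreScan cs aslice arng aneg (an + 1) false = true := by
                    simpa [pvPreScan, pvDigitChars] using hscan
                  simp only [Bool.and_eq_true, decide_eq_true_eq] at hscan'
                  obtain ⟨hle, hrec⟩ := hscan'
                  rcases hbr with ⟨_, hd⟩ | ⟨h16, _⟩
                  swap
                  · exfalso; omega
                  subst hd
                  have hset : ∀ v, (groups ++ cur :: List.replicate (15 - an) []).set an v
                      = groups ++ v :: List.replicate (15 - an) [] := by
                    intro v
                    rw [← hlen]; exact pv_set_at groups _ cur v
                  rw [List.foldl_cons, List.foldl_cons,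
                    show pvStepA ⟨aslice, arng, aneg, an, groups ++ [cur] ++ List.replicate (15 - an) [], false⟩ 'X'
                        = ⟨aslice, arng, aneg, an + 1, groups ++ pvDigitChars :: List.replicate (15 - an) [], false⟩ from by
                      simp [pvStepA, pvDigitChars, hset],
                    show pvStepB ⟨aslice, arng, aneg, groups, cur, false⟩ 'X'
                        = ⟨aslice, arng, aneg, groups ++ [pvDigitChars], [], false⟩ from by
                      simp [pvStepB]]
                  refine ih _ _ rfl ⟨rfl, rfl, rfl, rfl, by simp [hlen], by simp, ?_⟩ (by simpa using hrec)
                  simpa using pvPush an groups pvDigitChars hle hlen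
                · -- ignored character
                  rw [List.foldl_cons, List.foldl_cons,
                    show pvStepA ⟨aslice, arng, aneg, an, adigs, false⟩ c
                        = ⟨aslice, arng, aneg, an, adigs, false⟩ from by
                      simp [pvStepA, hlb, hhat, hrb, hmem, hdash, hX, hstar],
                    show pvStepB ⟨aslice, arng, aneg, groups, cur, false⟩ c
                        = ⟨aslice, arng, aneg, groups, cur, false⟩ from by
                      simp [pvStepB, hlb, hhat, hrb, hmem, hdash, hX, hstar]]
                  refine ih _ _ rfl ⟨rfl, rfl, rfl, rfl, hlen, hcur0, hbr⟩ ?_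
                  simpa [pvPreScan, hlb, hhat, hrb, hmem, hdash, hX, hstar] using hscan

-- B's dfs is A's filtered product with a prefix
lemma pvDfs_eq (rs re : Int) (gs : List (List Char)) : ∀ (s : List Char),
    pvDfs rs re gs s = (pvProduct gs).filterMap (fun t =>
      if (s ++ t) ≠ [] ∧ rs ≤ (PySem.Int.ofChars? (s ++ t)).getD 0
          ∧ (PySem.Int.ofChars? (s ++ t)).getD 0 ≤ re
      then some (String.ofList (s ++ t)) else none) := by
  induction gs with
  | nil =>
    intro s
    simp only [pvDfs, pvProduct, List.filterMap, List.append_nil]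
    split_ifs <;> rfl
  | cons g gs ih =>
    intro s
    simp only [pvDfs, pvProduct, List.filterMap_flatMap, List.filterMap_map]
    refine List.flatMap_congr ?_ -- pointwise
    intro x _
    rw [ih (s ++ [x])]
    simp

-- A's enumeration loop as a filterMap
lemma pvEnum_eq (rs re : Int) (L : List (List Char)) : ∀ (acc : List String),
    L.foldl (fun acc t =>
        let s := t.foldl (fun a c => a ++ [c]) []
        if s ≠ [] then
          let number := (PySem.Int.ofChars? s).getD 0
          if rs ≤ number ∧ number ≤ re then acc ++ [String.ofList s] else acc
        else acc) acc
      = acc ++ L.filterMap (fun t =>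
          if t ≠ [] ∧ rs ≤ (PySem.Int.ofChars? t).getD 0 ∧ (PySem.Int.ofChars? t).getD 0 ≤ re
          then some (String.ofList t) else none) := by
  induction L with
  | nil => intro acc; simp
  | cons t L ih =>
    intro acc
    rw [List.foldl_cons, ih]
    simp only [PySem.List.foldl_append_singleton_eq_self, List.nil_append, List.filterMap_cons]
    by_cases h1 : t ≠ []
    · by_cases h2 : rs ≤ (PySem.Int.ofChars? t).getD 0 ∧ (PySem.Int.ofChars? t).getD 0 ≤ re
      · simp [h1, h2]
      · simp [h1, h2]
    · simp [h1]

-- the initial states correspond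
lemma pvInit : pvInv
    ⟨false, false, false, 0, (List.range 16).foldl (fun l _ => l ++ [([] : List Char)]) [], false⟩
    ⟨false, false, false, [], [], false⟩ := by
  refine ⟨rfl, rfl, rfl, rfl, rfl, fun _ => rfl, Or.inl ⟨by decide, by decide⟩⟩

-- if cur is pushed only when nonempty, the filtered groups agree
lemma pvGroups_eq (groups : List (List Char)) (cur : List Char) :
    ((groups ++ (if cur ≠ [] then [cur] else [])).filter (fun g => g ≠ []))
      = (groups ++ [cur]).filter (fun g => g ≠ []) := by
  by_cases h : cur = [] <;> simp [h, List.filter_append]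

-- ===== VERDICT (by name: the statement is the Claim_ definition above) =====
theorem parse_regex_spec : Claim_equal_parse_regex := by
  unfold Claim_equal_parse_regex
  intro pattern rs re _ hpre
  unfold Spec_parse_regex parse_regex parse_regex_alt
  dsimp only
  have hrel := pvLoop pattern.toList _ _ rfl pvInit (by simpa using hpre)
  obtain ⟨hbail, hfil⟩ := hrel
  rw [← hbail]
  by_cases hB : (pattern.toList.foldl pvStepB ⟨false, false, false, [], [], false⟩).bail = true
  · simp [hB]
  · have hB' : (pattern.toList.foldl pvStepB ⟨false, false, false, [], [], false⟩).bail = false := by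
      simpa using hB
    rw [hB']
    simp only [Bool.false_eq_true, if_false]
    rw [pvEnum_eq, pvGroups_eq, ← hfil, pvDfs_eq]
    simp
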